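-- pv_equiv track=rewrite | github.com/Jonggil-dev/Algo | 정종길/프로그래머스/카카오 1회독/2022 KAKAO TECH INTERNSHIP/행렬과 연산.py | solution
-- ===== SOURCE A (Python) =====
-- from collections import deque
--
-- def solution(rc, operations):
--     answer = []
--     r, c = len(rc), len(rc[0])
--     left, body, right = deque(), deque(), deque()
--
--     for row in rc:
--         left.append(row[0])
--         body.append(deque(row[1:-1]))
--         right.append(row[-1])
--
--     for operation in operations:
--         if operation[0] == "S":
--             body.appendleft(body.pop())
--             left.appendleft(left.pop())
--             right.appendleft(right.pop())
--         else:
--             body[0].appendleft(left.popleft())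
--             right.appendleft(body[0].pop())
--             body[-1].append(right.pop())
--             left.append(body[-1].popleft())
--
--     for i in range(r):
--         answer.append([left[i]] + list(body[i]) + [right[i]])
--
--
--     return answer
-- ===== SOURCE B (Python) =====
-- def solution(rc, operations):
--     # Whole-row representation: a ShiftRow cyclically rotates the list of rows,
--     # and a Rotate rewrites the border ring clockwise in one closed-form pass.
--     rows = [list(row) for row in rc]
--     for op in operations:
--         if op[0] == "S":
--             rows.insert(0, rows.pop())
--         else:
--             lefts = [row[0] for row in rows]
--             rights = [row[-1] for row in rows]
--             top = [lefts[1]] + rows[0][:-1]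
--             bottom = rows[-1][1:] + [rights[-2]]
--             middle = [[lf] + row[1:-1] + [rt]
--                       for lf, row, rt in zip(lefts[2:], rows[1:-1], rights)]
--             rows = [top] + middle + [bottom]
--     return rows
-- ===== Notes on version B (the rewrite author's own statement) =====
-- stated objective: alternative
-- what changed: B keeps whole rows instead of A's three parallel deques (left column, interior deques, right column): ShiftRow rotates the row list and Rotate rewrites the border ring in one closed-form pass (new top/bottom rows and shifted side columns) instead of A's four sequential element transfers between deques; Pre_ excludes inputs where A raises IndexError (empty matrix, row or operation string) and degenerate single-row or single-column matrices, where A's deque transfers return shape-corrupted accidental values (e.g. …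
-- outside the precondition, e.g. on solution([[1, 2]], ['Rotate']): A returns [[2, 1]], B raises IndexError; on solution([[1], [2]], ['Rotate']): A returns [[2, 1], [2, 1]], B returns [[2], [1]]; on solution([[1, 2]], ['ShiftRow']): A returns [[1, 2]], B returns [[1, 2]]
import Mathlib
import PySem

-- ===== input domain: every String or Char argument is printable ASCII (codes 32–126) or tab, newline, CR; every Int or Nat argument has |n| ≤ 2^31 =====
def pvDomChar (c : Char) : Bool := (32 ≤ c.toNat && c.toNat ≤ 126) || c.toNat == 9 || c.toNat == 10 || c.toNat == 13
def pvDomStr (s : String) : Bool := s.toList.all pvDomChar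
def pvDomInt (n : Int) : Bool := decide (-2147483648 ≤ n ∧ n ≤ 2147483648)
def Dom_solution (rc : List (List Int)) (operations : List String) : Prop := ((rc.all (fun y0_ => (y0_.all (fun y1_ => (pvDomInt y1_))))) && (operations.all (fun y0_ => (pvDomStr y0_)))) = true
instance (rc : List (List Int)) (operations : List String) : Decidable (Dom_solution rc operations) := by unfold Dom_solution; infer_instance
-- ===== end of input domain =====

-- B keeps whole rows and rewrites the border ring in one closed-form pass per Rotate,
-- instead of A's four element transfers between three parallel deques; return values agree on Pre_, no argument is mutated.

-- ===== PORT A =====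
-- deque rotation d.appendleft(d.pop())  (junk head on [], reached only outside Pre_)
def pvDeqShift {α : Type} [Inhabited α] (d : List α) : List α := d.getLastI :: d.dropLast

-- the four transfers of A's Rotate branch, in Python's order; body[0]/body[-1] updates are
-- written as head / last rewrites (exact for the nonempty deques Pre_ guarantees)
def pvRotateA (s : List Int × List (List Int) × List Int) : List Int × List (List Int) × List Int :=
  -- body[0].appendleft(left.popleft())
  let l0 := s.1.headI
  let left1 := s.1.tail
  let body1 := (l0 :: s.2.1.headI) :: s.2.1.tail
  -- right.appendleft(body[0].pop())
  let t := body1.headI.getLastI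
  let body2 := body1.headI.dropLast :: body1.tail
  let right1 := t :: s.2.2
  -- body[-1].append(right.pop())
  let e := right1.getLastI
  let right2 := right1.dropLast
  let body3 := body2.dropLast ++ [body2.getLastI ++ [e]]
  -- left.append(body[-1].popleft())
  let bl := body3.getLastI.headI
  let body4 := body3.dropLast ++ [body3.getLastI.tail]
  (left1 ++ [bl], body4, right2)

def solution (rc : List (List Int)) (operations : List String) : List (List Int) :=
  let r := rc.length
  -- row[0] / row[1:-1] / row[-1]; ported by hand (headI / drop 1 then dropLast / getLastI),
  -- exact for the nonempty rows Pre_ guarantees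
  let left := rc.map (fun row => row.headI)
  let body := rc.map (fun row => (row.drop 1).dropLast)
  let right := rc.map (fun row => row.getLastI)
  let st := operations.foldl (fun s op =>
      if op.toList.head? = some 'S'                       -- operation[0] == "S" (Pre_: op ≠ "")
      then (pvDeqShift s.1, pvDeqShift s.2.1, pvDeqShift s.2.2)
      else pvRotateA s) (left, body, right)
  (List.range r).map (fun i => st.1.getD i 0 :: st.2.1.getD i [] ++ [st.2.2.getD i 0])

-- ===== PORT B =====
-- Source B's Rotate branch: new top/bottom rows and the zip building the middle rows
-- (Python zip3 ported as nested List.zip: both truncate to the shortest list;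
--  rows[0]/rows[1]/rows[-1]/rights[-2] accesses via headI/getD/getLastI, exact for the
--  matrices Pre_ admits)
def pvRotateB (rows : List (List Int)) : List (List Int) :=
  let lefts := rows.map (fun row => row.headI)
  let rights := rows.map (fun row => row.getLastI)
  let top := lefts.getD 1 0 :: rows.headI.dropLast
  let bottom := rows.getLastI.tail ++ [rights.getD (rights.length - 2) 0]
  let middle := ((lefts.drop 2).zip (((rows.drop 1).dropLast).zip rights)).map
      (fun p => p.1 :: (p.2.1.drop 1).dropLast ++ [p.2.2])
  top :: middle ++ [bottom]

def solution_alt (rc : List (List Int)) (operations : List String) : List (List Int) :=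
  -- rows = [list(row) for row in rc] is a pure copy; the fold never mutates rc
  operations.foldl (fun rows op =>
      if op.toList.head? = some 'S' then rows.getLastI :: rows.dropLast
      else pvRotateB rows) rc

-- ===== PRECONDITION & SPEC =====
-- Pre_ excludes the inputs where Python A raises IndexError (empty matrix, empty row,
-- empty operation string) and degenerate matrices with fewer than two rows or a row of
-- fewer than two elements, on which A's Rotate routes corner values through empty deques
-- and returns shape-corrupted accidental values (e.g. a one-element row comes back doubled)
-- while B's border rotation raises (single row) or gives the geometrically sensible result.
def Pre_solution (rc : List (List Int)) (operations : List String) : Prop :=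
  (decide (2 ≤ rc.length) && rc.all (fun row => decide (2 ≤ row.length))
    && operations.all (fun op => !op.toList.isEmpty)) = true
instance (rc : List (List Int)) (operations : List String) : Decidable (Pre_solution rc operations) := by
  unfold Pre_solution; infer_instance

def pvWitness_solution : List (List Int) × List String := ([[1, 2], [3, 4]], ["ShiftRow", "Rotate"])

def Spec_solution (rc : List (List Int)) (operations : List String) (out : List (List Int)) : Prop :=
  out = solution_alt rc operations
instance (rc : List (List Int)) (operations : List String) (out : List (List Int)) : Decidable (Spec_solution rc operations out) := by
  unfold Spec_solution; infer_instance

-- ===== CLAIM (what is proved, stated in full; the proofs are below) =====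
def Claim_equal_solution : Prop := ∀ (rc : List (List Int)) (operations : List String), Dom_solution rc operations → Pre_solution rc operations → Spec_solution rc operations (solution rc operations)


-- ===== LEMMAS AND PROOFS =====
-- the common shape: row i of the matrix is left[i] :: body[i] ++ [right[i]]
def pvZip3 : List Int → List (List Int) → List Int → List (List Int)
  | a :: as, m :: ms, c :: cs => (a :: m ++ [c]) :: pvZip3 as ms cs
  | _, _, _ => []

theorem pvZip3_cons (a : Int) (as : List Int) (m : List Int) (ms : List (List Int)) (c : Int) (cs : List Int) :
    pvZip3 (a :: as) (m :: ms) (c :: cs) = (a :: m ++ [c]) :: pvZip3 as ms cs := rfl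

theorem pv_head_tail {α : Type} [Inhabited α] (xs : List α) (h : xs ≠ []) : xs.headI :: xs.tail = xs := by
  cases xs with
  | nil => exact absurd rfl h
  | cons a l => rfl

theorem pv_getLastI_concat {α : Type} [Inhabited α] (xs : List α) (x : α) : (xs ++ [x]).getLastI = x := by
  simp [List.getLastI_eq_getLast?_getD]

theorem pv_getLastI_cons {α : Type} [Inhabited α] (a : α) (xs : List α) (h : xs ≠ []) :
    (a :: xs).getLastI = xs.getLastI := by
  cases xs with
  | nil => exact absurd rfl h
  | cons b t =>
    rw [List.getLastI_eq_getLast?_getD, List.getLastI_eq_getLast?_getD, List.getLast?_cons_cons]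

theorem pv_getLastI_eq_getLast {α : Type} [Inhabited α] (xs : List α) (h : xs ≠ []) :
    xs.getLastI = xs.getLast h := by
  rw [List.getLastI_eq_getLast?_getD, List.getLast?_eq_some_getLast h]
  rfl

theorem pv_dropLast_last {α : Type} [Inhabited α] (xs : List α) (h : xs ≠ []) :
    xs.dropLast ++ [xs.getLastI] = xs := by
  rw [pv_getLastI_eq_getLast xs h, List.dropLast_concat_getLast h]

theorem pv_dropLast_cons_concat {α : Type} (a : α) (xs : List α) (x : α) :
    (a :: xs ++ [x]).dropLast = a :: xs := by
  show ((a :: xs) ++ [x]).dropLast = a :: xs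
  rw [List.dropLast_concat]

-- zip3 structure lemmas
theorem pvZip3_map_headI : ∀ (l : List Int) (b : List (List Int)) (rg : List Int),
    b.length = l.length → rg.length = l.length →
    (pvZip3 l b rg).map (fun row => row.headI) = l := by
  intro l
  induction l with
  | nil => intro b rg _ _; simp [pvZip3]
  | cons a as ih =>
    intro b rg hb hrg
    cases b with
    | nil => simp at hb
    | cons m ms =>
      cases rg with
      | nil => simp at hrg
      | cons c cs =>
        rw [pvZip3_cons, List.map_cons, ih ms cs (by simpa using hb) (by simpa using hrg)]
        rfl

theorem pvZip3_map_getLastI : ∀ (l : List Int) (b : List (List Int)) (rg : List Int),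
    b.length = l.length → rg.length = l.length →
    (pvZip3 l b rg).map (fun row => row.getLastI) = rg := by
  intro l
  induction l with
  | nil =>
    intro b rg _ hrg
    cases rg with
    | nil => simp [pvZip3]
    | cons c cs => simp at hrg
  | cons a as ih =>
    intro b rg hb hrg
    cases b with
    | nil => simp at hb
    | cons m ms =>
      cases rg with
      | nil => simp at hrg
      | cons c cs =>
        simp only [pvZip3_cons, List.map_cons]
        rw [ih ms cs (by simpa using hb) (by simpa using hrg)]
        congr 1
        show (a :: (m ++ [c])).getLastI = c
        rw [pv_getLastI_cons a _ (by simp), pv_getLastI_concat]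

theorem pvZip3_map_mid : ∀ (l : List Int) (b : List (List Int)) (rg : List Int),
    b.length = l.length → rg.length = l.length →
    (pvZip3 l b rg).map (fun row => (row.drop 1).dropLast) = b := by
  intro l
  induction l with
  | nil =>
    intro b rg hb _
    cases b with
    | nil => simp [pvZip3]
    | cons m ms => simp at hb
  | cons a as ih =>
    intro b rg hb hrg
    cases b with
    | nil => simp at hb
    | cons m ms =>
      cases rg with
      | nil => simp at hrg
      | cons c cs =>
        simp only [pvZip3_cons, List.map_cons]
        rw [ih ms cs (by simpa using hb) (by simpa using hrg)]
        congr 1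
        show ((a :: (m ++ [c])).drop 1).dropLast = m
        simp

theorem pvZip3_dropLast : ∀ (l : List Int) (b : List (List Int)) (rg : List Int),
    b.length = l.length → rg.length = l.length →
    (pvZip3 l b rg).dropLast = pvZip3 l.dropLast b.dropLast rg.dropLast := by
  intro l
  induction l with
  | nil => intro b rg _ _; simp [pvZip3]
  | cons a as ih =>
    intro b rg hb hrg
    cases b with
    | nil => simp at hb
    | cons m ms =>
      cases rg with
      | nil => simp at hrg
      | cons c cs =>
        cases as with
        | nil =>
          cases ms with
          | nil =>
            cases cs with
            | nil => simp [pvZip3]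
            | cons _ _ => simp at hrg
          | cons _ _ => simp at hb
        | cons a2 as2 =>
          cases ms with
          | nil => simp at hb
          | cons m2 ms2 =>
            cases cs with
            | nil => simp at hrg
            | cons c2 cs2 =>
              have h1 : (m2 :: ms2).length = (a2 :: as2).length := by simpa using hb
              have h2 : (c2 :: cs2).length = (a2 :: as2).length := by simpa using hrg
              have hrec := ih (m2 :: ms2) (c2 :: cs2) h1 h2
              have e1 : pvZip3 (a2 :: as2) (m2 :: ms2) (c2 :: cs2)
                  = (a2 :: m2 ++ [c2]) :: pvZip3 as2 ms2 cs2 := rfl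
              rw [pvZip3_cons]
              calc ((a :: m ++ [c]) :: pvZip3 (a2 :: as2) (m2 :: ms2) (c2 :: cs2)).dropLast
                  = (a :: m ++ [c]) :: (pvZip3 (a2 :: as2) (m2 :: ms2) (c2 :: cs2)).dropLast := by
                    rw [e1, List.dropLast_cons₂]
                _ = (a :: m ++ [c]) :: pvZip3 (a2 :: as2).dropLast (m2 :: ms2).dropLast (c2 :: cs2).dropLast := by
                    rw [hrec]
                _ = pvZip3 (a :: a2 :: as2).dropLast (m :: m2 :: ms2).dropLast (c :: c2 :: cs2).dropLast := by
                    rw [List.dropLast_cons₂, List.dropLast_cons₂, List.dropLast_cons₂]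
                    rfl

theorem pvZip3_snocD : ∀ (as : List Int) (ms : List (List Int)) (cs : List Int) (x : Int) (m : List Int),
    ms.length = as.length → as.length < cs.length →
    pvZip3 (as ++ [x]) (ms ++ [m]) cs = pvZip3 as ms cs ++ [x :: m ++ [cs.getD as.length 0]] := by
  intro as
  induction as with
  | nil =>
    intro ms cs x m hm hc
    cases ms with
    | nil =>
      cases cs with
      | nil => simp at hc
      | cons c cs' => simp [pvZip3]
    | cons _ _ => simp at hm
  | cons a as' ih =>
    intro ms cs x m hm hc
    cases ms with
    | nil => simp at hm
    | cons m' ms' =>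
      cases cs with
      | nil => simp at hc
      | cons c cs' =>
        simp only [List.cons_append, pvZip3_cons, List.length_cons]
        rw [ih ms' cs' x m (by simpa using hm) (by simpa using hc)]
        simp [List.getD]

theorem pvZip3_truncR : ∀ (as : List Int) (ms : List (List Int)) (cs : List Int),
    as.length ≤ ms.length → as.length < cs.length →
    pvZip3 as ms cs.dropLast = pvZip3 as ms cs := by
  intro as
  induction as with
  | nil => intro ms cs _ _; cases ms <;> simp [pvZip3]
  | cons a as' ih =>
    intro ms cs hm hc
    cases ms with
    | nil => simp at hm
    | cons m ms' =>
      cases cs with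
      | nil => simp at hc
      | cons c cs' =>
        cases cs' with
        | nil => exact absurd hc (by simp)
        | cons c2 cs2 =>
          rw [List.dropLast_cons₂, pvZip3_cons, pvZip3_cons,
            ih ms' (c2 :: cs2) (by simpa using hm) (by simpa using hc)]

theorem pv_mid_zip : ∀ (xs : List Int) (ys : List (List Int)) (zs : List Int),
    ((xs.zip (ys.zip zs)).map (fun p => p.1 :: (p.2.1.drop 1).dropLast ++ [p.2.2]))
      = pvZip3 xs (ys.map (fun row => (row.drop 1).dropLast)) zs := by
  intro xs
  induction xs with
  | nil => intro ys zs; simp [pvZip3]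
  | cons x xs' ih =>
    intro ys zs
    cases ys with
    | nil => simp [pvZip3]
    | cons y ys' =>
      cases zs with
      | nil => simp [pvZip3]
      | cons z zs' =>
        simp only [List.zip_cons_cons, List.map_cons, pvZip3_cons]
        rw [ih ys' zs']

theorem pv_reconstruct : ∀ (l : List Int) (b : List (List Int)) (rg : List Int),
    b.length = l.length → rg.length = l.length →
    (List.range l.length).map (fun i => l.getD i 0 :: b.getD i [] ++ [rg.getD i 0]) = pvZip3 l b rg := by
  intro l
  induction l with
  | nil => intro b rg _ _; simp [pvZip3]
  | cons a as ih =>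
    intro b rg hb hrg
    cases b with
    | nil => simp at hb
    | cons m ms =>
      cases rg with
      | nil => simp at hrg
      | cons c cs =>
        have h1 : ms.length = as.length := by simpa using hb
        have h2 : cs.length = as.length := by simpa using hrg
        rw [List.length_cons, List.range_succ_eq_map, List.map_cons, List.map_map, pvZip3_cons,
          ← ih ms cs h1 h2]
        congr 1


theorem pv_dropLast_cons_ne {α : Type} (x : α) (xs : List α) (h : xs ≠ []) :
    (x :: xs).dropLast = x :: xs.dropLast := by
  cases xs with
  | nil => exact absurd rfl h
  | cons y t => rw [List.dropLast_cons₂]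

theorem pv_getD0_headI {α : Type} [Inhabited α] (xs : List α) (d : α) (h : xs ≠ []) :
    xs.getD 0 d = xs.headI := by
  cases xs with
  | nil => exact absurd rfl h
  | cons a t => rfl

theorem pv_getD_dropLast {α : Type} [Inhabited α] (xs : List α) (i : Nat) (d : α)
    (h : i < xs.length - 1) : xs.dropLast.getD i d = xs.getD i d := by
  rw [List.dropLast_eq_take, List.getD_eq_getElem?_getD, List.getD_eq_getElem?_getD,
    List.getElem?_take_of_lt h]

theorem pvZip3_getLastI : ∀ (l : List Int) (b : List (List Int)) (rg : List Int),
    b.length = l.length → rg.length = l.length → l ≠ [] →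
    (pvZip3 l b rg).getLastI = l.getLastI :: b.getLastI ++ [rg.getLastI] := by
  intro l
  induction l with
  | nil => intro b rg _ _ h; exact absurd rfl h
  | cons a as ih =>
    intro b rg hb hrg _
    cases b with
    | nil => simp at hb
    | cons m ms =>
      cases rg with
      | nil => simp at hrg
      | cons c cs =>
        cases as with
        | nil =>
          cases ms with
          | nil =>
            cases cs with
            | nil => rfl
            | cons _ _ => simp at hrg
          | cons _ _ => simp at hb
        | cons a2 as2 =>
          cases ms with
          | nil => simp at hb
          | cons m2 ms2 =>
            cases cs with
            | nil => simp at hrg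
            | cons c2 cs2 =>
              have h1 : (m2 :: ms2).length = (a2 :: as2).length := by simpa using hb
              have h2 : (c2 :: cs2).length = (a2 :: as2).length := by simpa using hrg
              have hrec := ih (m2 :: ms2) (c2 :: cs2) h1 h2 (by exact List.cons_ne_nil _ _)
              rw [pvZip3_cons, pv_getLastI_cons _ _ (by exact List.cons_ne_nil _ _), hrec,
                pv_getLastI_cons a _ (by exact List.cons_ne_nil _ _),
                pv_getLastI_cons m _ (by exact List.cons_ne_nil _ _),
                pv_getLastI_cons c _ (by exact List.cons_ne_nil _ _)]

theorem pvZip3_snoc (as : List Int) (ms : List (List Int)) (cs : List Int) (x : Int) (m : List Int) (c : Int)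
    (h1 : ms.length = as.length) (h2 : cs.length = as.length) :
    pvZip3 (as ++ [x]) (ms ++ [m]) (cs ++ [c]) = pvZip3 as ms cs ++ [x :: m ++ [c]] := by
  have hlt : as.length < (cs ++ [c]).length := by simp [h2]
  rw [pvZip3_snocD as ms (cs ++ [c]) x m h1 hlt]
  have e1 : (cs ++ [c]).getD as.length 0 = c := by
    rw [List.getD_eq_getElem?_getD, ← h2, List.getElem?_concat_length]
    rfl
  have e2 : pvZip3 as ms (cs ++ [c]) = pvZip3 as ms cs := by
    have := pvZip3_truncR as ms (cs ++ [c]) (le_of_eq h1.symm) hlt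
    rw [List.dropLast_concat] at this
    exact this.symm
  rw [e1, e2]

theorem pv_shift_comm (l : List Int) (b : List (List Int)) (rg : List Int)
    (hb : b.length = l.length) (hrg : rg.length = l.length) (h : l ≠ []) :
    (pvZip3 l b rg).getLastI :: (pvZip3 l b rg).dropLast
      = pvZip3 (pvDeqShift l) (pvDeqShift b) (pvDeqShift rg) := by
  have hb0 : b ≠ [] := by
    intro hh; rw [hh] at hb; simp at hb; exact h (List.length_eq_zero_iff.mp hb.symm)
  have hrg0 : rg ≠ [] := by
    intro hh; rw [hh] at hrg; simp at hrg; exact h (List.length_eq_zero_iff.mp hrg.symm)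
  have hlen : b.dropLast.length = l.dropLast.length := by simp [hb]
  have hlen2 : rg.dropLast.length = l.dropLast.length := by simp [hrg]
  have e : pvZip3 l b rg
      = pvZip3 l.dropLast b.dropLast rg.dropLast ++ [l.getLastI :: b.getLastI ++ [rg.getLastI]] := by
    conv_lhs => rw [← pv_dropLast_last l h, ← pv_dropLast_last b hb0, ← pv_dropLast_last rg hrg0]
    rw [pvZip3_snoc _ _ _ _ _ _ hlen hlen2]
  rw [e, pv_getLastI_concat, List.dropLast_concat]
  show _ = pvZip3 (l.getLastI :: l.dropLast) (b.getLastI :: b.dropLast) (rg.getLastI :: rg.dropLast)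
  rw [pvZip3_cons]

theorem pv_rot2_comm (a : Int) (l' : List Int) (m0 : List Int) (b' : List (List Int)) (c0 : Int) (rg' : List Int)
    (hl' : l' ≠ []) (hb : b'.length = l'.length) (hrg : rg'.length = l'.length) :
    pvRotateB (pvZip3 (a :: l') (m0 :: b') (c0 :: rg'))
      = pvZip3 (pvRotateA (a :: l', m0 :: b', c0 :: rg')).1
          (pvRotateA (a :: l', m0 :: b', c0 :: rg')).2.1
          (pvRotateA (a :: l', m0 :: b', c0 :: rg')).2.2 := by
  have hb0 : b' ≠ [] := by
    intro hh; rw [hh] at hb; exact hl' (List.length_eq_zero_iff.mp (by simpa using hb.symm))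
  have hrg0 : rg' ≠ [] := by
    intro hh; rw [hh] at hrg; exact hl' (List.length_eq_zero_iff.mp (by simpa using hrg.symm))
  have hY0 : (b'.getLastI ++ [rg'.getLastI] : List (Int)) ≠ [] := by simp
  -- A side
  have hA : pvRotateA (a :: l', m0 :: b', c0 :: rg')
      = (l' ++ [(b'.getLastI ++ [rg'.getLastI]).headI],
         ((a :: m0).dropLast :: b'.dropLast) ++ [(b'.getLastI ++ [rg'.getLastI]).tail],
         (a :: m0).getLastI :: (c0 :: rg').dropLast) := by
    simp only [pvRotateA, List.headI, List.tail_cons]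
    rw [pv_getLastI_cons ((a :: m0).getLastI) (c0 :: rg') (List.cons_ne_nil _ _),
      pv_getLastI_cons c0 rg' hrg0,
      pv_dropLast_cons_ne ((a :: m0).dropLast) b' hb0,
      pv_getLastI_cons ((a :: m0).dropLast) b' hb0,
      pv_getLastI_concat, List.dropLast_concat, List.dropLast_cons₂]
  -- B side
  have hmapb : (m0 :: b').length = (a :: l').length := by simp [hb]
  have hmaprg : (c0 :: rg').length = (a :: l').length := by simp [hrg]
  have hB : pvRotateB (pvZip3 (a :: l') (m0 :: b') (c0 :: rg'))
      = (l'.headI :: a :: m0) ::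
          pvZip3 l'.tail b'.dropLast (c0 :: rg') ++
          [(b'.getLastI ++ [rg'.getLastI]) ++ [(c0 :: rg').getD (l'.length - 1) 0]] := by
    simp only [pvRotateB]
    rw [pvZip3_map_headI _ _ _ hmapb hmaprg, pvZip3_map_getLastI _ _ _ hmapb hmaprg,
      pv_mid_zip]
    have edrop : (pvZip3 (a :: l') (m0 :: b') (c0 :: rg')).drop 1 = pvZip3 l' b' rg' := rfl
    rw [edrop, pvZip3_dropLast l' b' rg' hb hrg,
      pvZip3_map_mid _ _ _ (by simp [hb]) (by simp [hrg])]
    have ehead : (pvZip3 (a :: l') (m0 :: b') (c0 :: rg')).headI = (a :: m0) ++ [c0] := rfl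
    rw [ehead, pv_dropLast_cons_concat]
    have egetd : (a :: l').getD 1 0 = l'.headI := by
      rw [show (1 : Nat) = 0 + 1 from rfl, List.getD_cons_succ, pv_getD0_headI _ _ hl']
    rw [egetd]
    have elast : (pvZip3 (a :: l') (m0 :: b') (c0 :: rg')).getLastI
        = (a :: l').getLastI :: (m0 :: b').getLastI ++ [(c0 :: rg').getLastI] :=
      pvZip3_getLastI _ _ _ hmapb hmaprg (List.cons_ne_nil _ _)
    rw [elast, pv_getLastI_cons m0 b' hb0]
    have etail : (((a :: l').getLastI :: b'.getLastI) ++ [(c0 :: rg').getLastI]).tail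
        = b'.getLastI ++ [(c0 :: rg').getLastI] := rfl
    rw [etail, pv_getLastI_cons c0 rg' hrg0]
    have elen : ((c0 :: rg').length - 2 : Nat) = l'.length - 1 := by
      simp [hrg]
    rw [elen]
    have edrop2 : (a :: l').drop 2 = l'.tail := by
      cases l' with
      | nil => rfl
      | cons x t => rfl
    rw [edrop2]
  rw [hA, hB]
  -- assemble the right-hand side
  have eL : l' ++ [(b'.getLastI ++ [rg'.getLastI]).headI]
      = l'.headI :: (l'.tail ++ [(b'.getLastI ++ [rg'.getLastI]).headI]) := by
    conv_lhs => rw [← pv_head_tail l' hl']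
    rw [List.cons_append]
  rw [eL]
  have econs : pvZip3 (l'.headI :: (l'.tail ++ [(b'.getLastI ++ [rg'.getLastI]).headI]))
      (((a :: m0).dropLast :: b'.dropLast) ++ [(b'.getLastI ++ [rg'.getLastI]).tail])
      ((a :: m0).getLastI :: (c0 :: rg').dropLast)
      = ((l'.headI :: (a :: m0).dropLast) ++ [(a :: m0).getLastI]) ::
          pvZip3 (l'.tail ++ [(b'.getLastI ++ [rg'.getLastI]).headI])
            (b'.dropLast ++ [(b'.getLastI ++ [rg'.getLastI]).tail])
            ((c0 :: rg').dropLast) := rfl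
  rw [econs]
  have erow0 : (l'.headI :: (a :: m0).dropLast) ++ [(a :: m0).getLastI] = l'.headI :: a :: m0 := by
    rw [List.cons_append, pv_dropLast_last (a :: m0) (List.cons_ne_nil _ _)]
  rw [erow0]
  have hlen1 : b'.dropLast.length = l'.tail.length := by simp [hb]
  have hlen2 : l'.tail.length < ((c0 :: rg').dropLast).length := by
    have h1 : 0 < l'.length := List.length_pos_of_ne_nil hl'
    simp only [List.length_dropLast, List.length_cons, List.length_tail, hrg]
    omega
  rw [pvZip3_snocD l'.tail b'.dropLast ((c0 :: rg').dropLast) _ _ hlen1 hlen2]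
  have etrunc : pvZip3 l'.tail b'.dropLast ((c0 :: rg').dropLast)
      = pvZip3 l'.tail b'.dropLast (c0 :: rg') := by
    apply pvZip3_truncR
    · omega
    · have h1 : 0 < l'.length := List.length_pos_of_ne_nil hl'
      simp only [List.length_tail, List.length_cons, hrg]
      omega
  rw [etrunc]
  have erowlast : ((b'.getLastI ++ [rg'.getLastI]).headI :: (b'.getLastI ++ [rg'.getLastI]).tail)
      ++ [((c0 :: rg').dropLast).getD l'.tail.length 0]
      = (b'.getLastI ++ [rg'.getLastI]) ++ [(c0 :: rg').getD (l'.length - 1) 0] := by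
    rw [pv_head_tail _ hY0, pv_getD_dropLast, List.length_tail]
    have h1 : 0 < l'.length := List.length_pos_of_ne_nil hl'
    simp only [List.length_tail, List.length_cons, hrg]
    omega
  rw [← erowlast]
  rfl

theorem pvDeqShift_length {α : Type} [Inhabited α] (xs : List α) (h : xs ≠ []) :
    (pvDeqShift xs).length = xs.length := by
  have := List.length_pos_of_ne_nil h
  simp only [pvDeqShift, List.length_cons, List.length_dropLast]
  omega

theorem pvRotateA_length (l : List Int) (b : List (List Int)) (rg : List Int) (n : Nat)
    (hl : l.length = n) (hb : b.length = n) (hrg : rg.length = n) (hn : 1 ≤ n) :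
    (pvRotateA (l, b, rg)).1.length = n ∧ (pvRotateA (l, b, rg)).2.1.length = n ∧
      (pvRotateA (l, b, rg)).2.2.length = n := by
  simp only [pvRotateA, List.length_append, List.length_cons, List.length_dropLast,
    List.length_tail, List.length_nil]
  omega

theorem pv_fold (n : Nat) (hn : 2 ≤ n) : ∀ (ops : List String) (l : List Int) (b : List (List Int)) (rg : List Int),
    l.length = n → b.length = n → rg.length = n →
    (ops.foldl (fun rows op =>
        if op.toList.head? = some 'S' then rows.getLastI :: rows.dropLast
        else pvRotateB rows) (pvZip3 l b rg)
      = pvZip3 (ops.foldl (fun s op =>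
            if op.toList.head? = some 'S'
            then (pvDeqShift s.1, pvDeqShift s.2.1, pvDeqShift s.2.2)
            else pvRotateA s) (l, b, rg)).1
          (ops.foldl (fun s op =>
            if op.toList.head? = some 'S'
            then (pvDeqShift s.1, pvDeqShift s.2.1, pvDeqShift s.2.2)
            else pvRotateA s) (l, b, rg)).2.1
          (ops.foldl (fun s op =>
            if op.toList.head? = some 'S'
            then (pvDeqShift s.1, pvDeqShift s.2.1, pvDeqShift s.2.2)
            else pvRotateA s) (l, b, rg)).2.2)
    ∧ (ops.foldl (fun s op =>
          if op.toList.head? = some 'S'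
          then (pvDeqShift s.1, pvDeqShift s.2.1, pvDeqShift s.2.2)
          else pvRotateA s) (l, b, rg)).1.length = n
    ∧ (ops.foldl (fun s op =>
          if op.toList.head? = some 'S'
          then (pvDeqShift s.1, pvDeqShift s.2.1, pvDeqShift s.2.2)
          else pvRotateA s) (l, b, rg)).2.1.length = n
    ∧ (ops.foldl (fun s op =>
          if op.toList.head? = some 'S'
          then (pvDeqShift s.1, pvDeqShift s.2.1, pvDeqShift s.2.2)
          else pvRotateA s) (l, b, rg)).2.2.length = n := by
  intro ops
  induction ops with
  | nil =>
    intro l b rg hl hb hrg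
    exact ⟨rfl, hl, hb, hrg⟩
  | cons op ops' ih =>
    intro l b rg hl hb hrg
    have hl0 : l ≠ [] := by intro hh; rw [hh] at hl; simp at hl; omega
    have hb0 : b ≠ [] := by intro hh; rw [hh] at hb; simp at hb; omega
    have hrg0 : rg ≠ [] := by intro hh; rw [hh] at hrg; simp at hrg; omega
    simp only [List.foldl_cons]
    by_cases hS : op.toList.head? = some 'S'
    · rw [if_pos hS, if_pos hS,
        pv_shift_comm l b rg (by omega) (by omega) hl0]
      exact ih (pvDeqShift l) (pvDeqShift b) (pvDeqShift rg)
        (by rw [pvDeqShift_length _ hl0]; exact hl)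
        (by rw [pvDeqShift_length _ hb0]; exact hb)
        (by rw [pvDeqShift_length _ hrg0]; exact hrg)
    · rw [if_neg hS, if_neg hS]
      cases l with
      | nil => exact absurd rfl hl0
      | cons a l' =>
        cases b with
        | nil => exact absurd rfl hb0
        | cons m b' =>
          cases rg with
          | nil => exact absurd rfl hrg0
          | cons c rg' =>
            have hll : l' ≠ [] := by
              intro hh; rw [hh] at hl; simp at hl; omega
            have hbb : b'.length = l'.length := by
              simp at hl hb; omega
            have hrr : rg'.length = l'.length := by
              simp at hl hrg; omega
            rw [pv_rot2_comm a l' m b' c rg' hll hbb hrr]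
            have hlen := pvRotateA_length (a :: l') (m :: b') (c :: rg') n hl hb hrg (by omega)
            exact ih _ _ _ hlen.1 hlen.2.1 hlen.2.2

-- a matrix whose rows all have at least two elements is exactly its zip3 decomposition
theorem pv_rows_eq_zip3 : ∀ (rc : List (List Int)),
    (∀ row ∈ rc, 2 ≤ row.length) →
    rc = pvZip3 (rc.map fun row => row.headI)
      (rc.map fun row => (row.drop 1).dropLast) (rc.map fun row => row.getLastI) := by
  intro rc
  induction rc with
  | nil => intro _; rfl
  | cons row rest ih =>
    intro h
    have hrow : 2 ≤ row.length := h row (by simp)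
    simp only [List.map_cons, pvZip3_cons]
    rw [← ih (fun r hr => h r (by simp [hr]))]
    congr 1
    cases row with
    | nil => simp at hrow
    | cons a t =>
      have ht : t ≠ [] := by intro hh; rw [hh] at hrow; simp at hrow
      simp only [List.drop_one, List.tail_cons]
      rw [pv_getLastI_cons a t ht]
      show a :: t = a :: (t.dropLast ++ [t.getLastI])
      rw [pv_dropLast_last t ht]

theorem solution_spec : Claim_equal_solution := by
  intro rc ops _ hpre
  simp only [Pre_solution, Bool.and_eq_true, decide_eq_true_eq, List.all_eq_true] at hpre
  obtain ⟨⟨hr, hrows⟩, _⟩ := hpre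
  show solution rc ops = solution_alt rc ops
  simp only [solution, solution_alt]
  have hrc := pv_rows_eq_zip3 rc (fun row hrow => by
    have := hrows row hrow; simpa using this)
  conv_rhs => rw [hrc]
  have hfold := pv_fold rc.length hr ops (rc.map fun row => row.headI)
      (rc.map fun row => (row.drop 1).dropLast) (rc.map fun row => row.getLastI)
      (by simp) (by simp) (by simp)
  rw [hfold.1,
    ← pv_reconstruct _ _ _ (hfold.2.2.1.trans hfold.2.1.symm) (hfold.2.2.2.trans hfold.2.1.symm),
    hfold.2.1]
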